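-- pv_equiv track=rewrite | github.com/EiriniOr/movie-rec-transformer | app/utils/inference.py | find_closest_training_user
-- ===== SOURCE A (Python) =====
-- def find_closest_training_user(
--     query_history: list[int],
--     sequences_train: dict[int, list[int]] | None,
--     mf_user2idx: dict[int, int],
-- ) -> tuple[int, int]:
--     """
--     Find the training user whose watch history has the most overlap with
--     query_history.  Used to proxy MF recommendations for arbitrary inputs.
--
--     sequences_train may be None on Streamlit Cloud (the pkl is too large to
--     commit; only the model weights and small mappings are in the repo).
--     In that case we fall back to user index 0.
--
--     Returns (raw_user_id, mf_user_idx).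
--     """
--     if not sequences_train:
--         # sequences_train not available (Streamlit Cloud deployment) — use first user
--         first_uid = next(iter(mf_user2idx))
--         return first_uid, mf_user2idx[first_uid]
--
--     query_set = set(query_history)
--     best_uid, best_overlap = -1, -1
--     for uid, seq in sequences_train.items():
--         if uid not in mf_user2idx:
--             continue
--         overlap = len(query_set & set(seq))
--         if overlap > best_overlap:
--             best_overlap = overlap
--             best_uid = uid
--     return best_uid, mf_user2idx.get(best_uid, 0)
-- ===== SOURCE B (Python) =====
-- def find_closest_training_user(
--     query_history: list[int],
--     sequences_train: dict[int, list[int]] | None,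
--     mf_user2idx: dict[int, int],
-- ) -> tuple[int, int]:
--     if not sequences_train:
--         first_uid = next(iter(mf_user2idx))
--         return first_uid, mf_user2idx[first_uid]
--
--     # inverted index: movie id -> set of training users (known to the MF model)
--     # whose sequence contains that movie
--     index = {}
--     for uid, seq in sequences_train.items():
--         if uid in mf_user2idx:
--             for m in seq:
--                 index.setdefault(m, set()).add(uid)
--
--     # overlap counts: one increment per distinct query movie found in a user's sequence
--     overlaps = {}
--     for m in set(query_history):
--         for u in index.get(m, ()):
--             overlaps[u] = overlaps.get(u, 0) + 1
--
--     best_uid, best_overlap = -1, -1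
--     for uid in sequences_train:
--         if uid not in mf_user2idx:
--             continue
--         ov = overlaps.get(uid, 0)
--         if ov > best_overlap:
--             best_overlap = ov
--             best_uid = uid
--     return best_uid, mf_user2idx.get(best_uid, 0)
-- ===== Notes on version B (the rewrite author's own statement) =====
-- stated objective: alternative
-- what changed: Replaces the per-user set-intersection inside the selection loop by an inverted index (movie -> set of known training users) plus an overlap counter filled once from the distinct query movies; the final pick still scans sequences_train in insertion order with the same best_overlap=-1 start and strict > update.
import Mathlib
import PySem

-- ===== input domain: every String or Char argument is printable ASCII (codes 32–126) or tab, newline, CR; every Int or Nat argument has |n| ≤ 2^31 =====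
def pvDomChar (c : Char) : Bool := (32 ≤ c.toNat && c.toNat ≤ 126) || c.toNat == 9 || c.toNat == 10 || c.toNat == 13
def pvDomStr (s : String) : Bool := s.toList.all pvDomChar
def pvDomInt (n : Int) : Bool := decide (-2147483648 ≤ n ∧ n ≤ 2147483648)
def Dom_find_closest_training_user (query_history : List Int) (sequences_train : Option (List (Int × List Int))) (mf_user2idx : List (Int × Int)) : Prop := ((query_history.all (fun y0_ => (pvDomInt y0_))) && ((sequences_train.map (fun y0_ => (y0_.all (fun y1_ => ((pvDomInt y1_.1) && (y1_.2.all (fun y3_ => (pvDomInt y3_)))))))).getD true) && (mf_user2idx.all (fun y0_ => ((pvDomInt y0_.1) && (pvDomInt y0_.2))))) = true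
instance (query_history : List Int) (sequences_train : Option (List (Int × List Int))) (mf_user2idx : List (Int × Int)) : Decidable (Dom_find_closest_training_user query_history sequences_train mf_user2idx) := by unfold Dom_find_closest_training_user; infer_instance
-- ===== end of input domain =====

-- B replaces A's per-user set intersection by an inverted index (movie -> users) plus an
-- overlap counter filled from the distinct query movies; same selection order and tie-breaking.
-- Equivalence is about the RETURN value only (neither program mutates its arguments).

-- ===== PORT A =====
-- next(iter(mf_user2idx)); mf_user2idx[first_uid].  On an empty dict Python raises
-- StopIteration — that input is excluded by Pre_, the [] branch value here is a dummy.
def pvA_firstUser (mf_user2idx : List (Int × Int)) : Int × Int :=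
  match mf_user2idx with
  | [] => (0, 0)
  | (k, v) :: _ => (k, v)

def find_closest_training_user (query_history : List Int) (sequences_train : Option (List (Int × List Int))) (mf_user2idx : List (Int × Int)) : Int × Int :=
  match sequences_train with
  | none => pvA_firstUser mf_user2idx
  | some l =>
    if l = [] then pvA_firstUser mf_user2idx
    else
      let query_set : PySem.Set Int := PySem.Set.ofList query_history
      let best := l.foldl (fun (b : Int × Int) (p : Int × List Int) =>
        if (mf_user2idx.lookup p.1).isSome then
          let overlap : Int := ((PySem.Set.inter query_set p.2).length : Int)
          if overlap > b.2 then (p.1, overlap) else b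
        else b) (-1, -1)
      (best.1, (mf_user2idx.lookup best.1).getD 0)

-- ===== PORT B =====
def pvB_firstUser (mf_user2idx : List (Int × Int)) : Int × Int :=
  match mf_user2idx with
  | [] => (0, 0)
  | (k, v) :: _ => (k, v)

-- index.setdefault(m, set()).add(uid), looped over all (uid, seq) with uid in mf_user2idx
def pvB_index (l : List (Int × List Int)) (mf_user2idx : List (Int × Int)) : PySem.Dict Int (PySem.Set Int) :=
  l.foldl (fun ix p =>
    if (mf_user2idx.lookup p.1).isSome then
      p.2.foldl (fun ix2 m => ix2.insert m (PySem.Set.add (ix2.getD m []) p.1)) ix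
    else ix) PySem.Dict.empty

-- overlaps[u] = overlaps.get(u, 0) + 1, for u in index.get(m, ()), for m in set(query_history)
-- (Source B iterates the posting SETS in hash order; the resulting counter — only ever read by
-- .get afterwards — does not depend on that order, so folding in list order is exact)
def pvB_overlaps (query_history : List Int) (ix : PySem.Dict Int (PySem.Set Int)) : PySem.Dict Int Int :=
  (PySem.Set.ofList query_history).foldl (fun c m =>
    (ix.getD m []).foldl (fun c2 u => c2.insert u (c2.getD u 0 + 1)) c) PySem.Dict.empty

def find_closest_training_user_alt (query_history : List Int) (sequences_train : Option (List (Int × List Int))) (mf_user2idx : List (Int × Int)) : Int × Int :=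
  match sequences_train with
  | none => pvB_firstUser mf_user2idx
  | some l =>
    if l = [] then pvB_firstUser mf_user2idx
    else
      let ov := pvB_overlaps query_history (pvB_index l mf_user2idx)
      let best := l.foldl (fun (b : Int × Int) (p : Int × List Int) =>
        if (mf_user2idx.lookup p.1).isSome then
          if ov.getD p.1 0 > b.2 then (p.1, ov.getD p.1 0) else b
        else b) (-1, -1)
      (best.1, (mf_user2idx.lookup best.1).getD 0)

-- ===== PRECONDITION & SPEC =====
-- Pre_ excludes (i) inputs where A raises StopIteration (sequences_train None or empty together
-- with an empty mf_user2idx) and (ii) sequences_train association lists with duplicate keys,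
-- which no Python dict can represent (dict() collapses them, so both programs agree there).
def Pre_find_closest_training_user (query_history : List Int) (sequences_train : Option (List (Int × List Int))) (mf_user2idx : List (Int × Int)) : Prop :=
  ((sequences_train.getD []) = [] → mf_user2idx ≠ []) ∧ (((sequences_train.getD []).map Prod.fst).Nodup)
instance (query_history : List Int) (sequences_train : Option (List (Int × List Int))) (mf_user2idx : List (Int × Int)) : Decidable (Pre_find_closest_training_user query_history sequences_train mf_user2idx) := by unfold Pre_find_closest_training_user; infer_instance

def pvWitness_find_closest_training_user : List Int × (Option (List (Int × List Int))) × (List (Int × Int)) :=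
  ([1, 2, 3], some [(5, [1, 3]), (6, [2]), (7, [1, 2, 3])], [(5, 0), (6, 1)])

def Spec_find_closest_training_user (query_history : List Int) (sequences_train : Option (List (Int × List Int))) (mf_user2idx : List (Int × Int)) (out : Int × Int) : Prop := out = find_closest_training_user_alt query_history sequences_train mf_user2idx
instance (query_history : List Int) (sequences_train : Option (List (Int × List Int))) (mf_user2idx : List (Int × Int)) (out : Int × Int) : Decidable (Spec_find_closest_training_user query_history sequences_train mf_user2idx out) := by unfold Spec_find_closest_training_user; infer_instance

-- ===== CLAIM (what is proved, stated in full; the proofs are below) =====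
def Claim_equal_find_closest_training_user : Prop := ∀ (query_history : List Int) (sequences_train : Option (List (Int × List Int))) (mf_user2idx : List (Int × Int)), Dom_find_closest_training_user query_history sequences_train mf_user2idx → Pre_find_closest_training_user query_history sequences_train mf_user2idx → Spec_find_closest_training_user query_history sequences_train mf_user2idx (find_closest_training_user query_history sequences_train mf_user2idx)

-- ===== LEMMAS AND PROOFS =====

-- one user's inner fold: each movie of seq gains this uid, other postings are untouched
theorem pv_inner_getD (uid : Int) (seq : List Int) (ix : PySem.Dict Int (PySem.Set Int)) (m : Int) :
    ((seq.foldl (fun ix2 m' => ix2.insert m' (PySem.Set.add (ix2.getD m' []) uid)) ix).getD m [])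
      = if m ∈ seq then PySem.Set.add (ix.getD m []) uid else ix.getD m [] := by
  induction seq generalizing ix with
  | nil => simp
  | cons a t ih =>
    simp only [List.foldl_cons, ih, PySem.Dict.getD_insert, List.mem_cons]
    by_cases hma : m = a
    · subst hma
      by_cases hmt : m ∈ t <;> simp [hmt]
    · by_cases hmt : m ∈ t <;> simp [hma, hmt]

-- membership in the built index
theorem pv_index_mem (l : List (Int × List Int)) (mf : List (Int × Int))
    (ix : PySem.Dict Int (PySem.Set Int)) (m u : Int) :
    (u ∈ (l.foldl (fun ix p =>
        if (mf.lookup p.1).isSome then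
          p.2.foldl (fun ix2 m' => ix2.insert m' (PySem.Set.add (ix2.getD m' []) p.1)) ix
        else ix) ix).getD m [])
      ↔ u ∈ ix.getD m [] ∨ ∃ seq, (u, seq) ∈ l ∧ (mf.lookup u).isSome ∧ m ∈ seq := by
  induction l generalizing ix with
  | nil => simp
  | cons p t ih =>
    rw [List.foldl_cons]
    by_cases hok : (mf.lookup p.1).isSome
    · rw [if_pos hok, ih]
      constructor
      · rintro (hm | ⟨seq, hseq, hu, hms⟩)
        · rw [pv_inner_getD] at hm
          by_cases hmp : m ∈ p.2
          · rw [if_pos hmp] at hm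
            rcases (PySem.Set.mem_add _ _ _).mp hm with h | h
            · exact Or.inl h
            · subst h
              exact Or.inr ⟨p.2, List.mem_cons_self .., hok, hmp⟩
          · rw [if_neg hmp] at hm; exact Or.inl hm
        · exact Or.inr ⟨seq, List.mem_cons_of_mem _ hseq, hu, hms⟩
      · rintro (hm | ⟨seq, hmem, hu, hms⟩)
        · left
          rw [pv_inner_getD]
          by_cases hmp : m ∈ p.2
          · rw [if_pos hmp]; exact (PySem.Set.mem_add _ _ _).mpr (Or.inl hm)
          · rw [if_neg hmp]; exact hm
        · rcases List.mem_cons.mp hmem with hp | ht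
          · obtain ⟨h1, h2⟩ : p.1 = u ∧ p.2 = seq := by rw [← hp]; exact ⟨rfl, rfl⟩
            left
            rw [pv_inner_getD, if_pos (h2 ▸ hms)]
            exact (PySem.Set.mem_add _ _ _).mpr (Or.inr h1.symm)
          · exact Or.inr ⟨seq, ht, hu, hms⟩
    · rw [if_neg hok, ih]
      constructor
      · rintro (hm | ⟨seq, hs, hu, hms⟩)
        · exact Or.inl hm
        · exact Or.inr ⟨seq, List.mem_cons_of_mem _ hs, hu, hms⟩
      · rintro (hm | ⟨seq, hmem, hu, hms⟩)
        · exact Or.inl hm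
        · rcases List.mem_cons.mp hmem with hp | ht
          · exfalso
            have : p.1 = u := by rw [← hp]
            rw [this] at hok; exact hok hu
          · exact Or.inr ⟨seq, ht, hu, hms⟩

-- every posting list in the index is duplicate-free
theorem pv_index_nodup (l : List (Int × List Int)) (mf : List (Int × Int))
    (ix : PySem.Dict Int (PySem.Set Int)) (m : Int)
    (h : ∀ m', (ix.getD m' []).Nodup) :
    ((l.foldl (fun ix p =>
        if (mf.lookup p.1).isSome then
          p.2.foldl (fun ix2 m' => ix2.insert m' (PySem.Set.add (ix2.getD m' []) p.1)) ix
        else ix) ix).getD m []).Nodup := by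
  induction l generalizing ix with
  | nil => exact h m
  | cons p t ih =>
    simp only [List.foldl_cons]
    apply ih
    intro m'
    by_cases hok : (mf.lookup p.1).isSome
    · rw [if_pos hok, pv_inner_getD]
      by_cases hmp : m' ∈ p.2
      · rw [if_pos hmp]; exact PySem.Set.nodup_add _ _ (h m')
      · rw [if_neg hmp]; exact h m'
    · rw [if_neg hok]; exact h m'

-- the counter after the whole outer loop
theorem pv_counter_getD (ms : List Int) (ix : PySem.Dict Int (PySem.Set Int))
    (c : PySem.Dict Int Int) (u : Int) :
    ((ms.foldl (fun c m =>
        (ix.getD m []).foldl (fun c2 u' => c2.insert u' (c2.getD u' 0 + 1)) c) c).getD u 0)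
      = c.getD u 0 + (ms.map (fun m => (((ix.getD m []).count u : Nat) : Int))).sum := by
  induction ms generalizing c with
  | nil => simp
  | cons a t ih =>
    simp only [List.foldl_cons, List.map_cons, List.sum_cons, ih,
      PySem.Dict.getD_foldl_insert_add_one]
    ring

-- a key of a nodup-key association list determines its value
theorem pv_keys_nodup_val {l : List (Int × List Int)} (hnd : (l.map Prod.fst).Nodup)
    {u : Int} {s1 s2 : List Int} (h1 : (u, s1) ∈ l) (h2 : (u, s2) ∈ l) : s1 = s2 := by
  induction l with
  | nil => simp at h1
  | cons p t ih =>
    simp only [List.map_cons, List.nodup_cons] at hnd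
    rcases List.mem_cons.mp h1 with e1 | m1 <;> rcases List.mem_cons.mp h2 with e2 | m2
    · simpa using congrArg Prod.snd (e1.trans e2.symm)
    · exfalso; exact hnd.1 (by rw [← e1] at *; exact List.mem_map.mpr ⟨(u, s2), m2, rfl⟩)
    · exfalso; exact hnd.1 (by rw [← e2] at *; exact List.mem_map.mpr ⟨(u, s1), m1, rfl⟩)
    · exact ih hnd.2 m1 m2

-- the counter value of a listed, known user IS A's per-user overlap
theorem pv_overlap_eq (q : List Int) (l : List (Int × List Int)) (mf : List (Int × Int))
    (hnd : (l.map Prod.fst).Nodup) {u : Int} {seq : List Int}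
    (hmem : (u, seq) ∈ l) (hok : (mf.lookup u).isSome) :
    (pvB_overlaps q (pvB_index l mf)).getD u 0
      = ((PySem.Set.inter (PySem.Set.ofList q) seq).length : Int) := by
  unfold pvB_overlaps
  rw [pv_counter_getD]
  have hmemix : ∀ m : Int, u ∈ ((pvB_index l mf).getD m []) ↔ m ∈ seq := by
    intro m
    unfold pvB_index
    rw [pv_index_mem]
    simp only [PySem.Dict.getD_empty, List.not_mem_nil, false_or]
    constructor
    · rintro ⟨seq', hs', _, hm⟩
      rwa [pv_keys_nodup_val hnd hmem hs'] 
    · intro hm; exact ⟨seq, hmem, hok, hm⟩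
  have hcount : ∀ m : Int, ((pvB_index l mf).getD m []).count u
      = if m ∈ seq then 1 else 0 := by
    intro m
    have hnd' : ((pvB_index l mf).getD m []).Nodup := by
      unfold pvB_index
      exact pv_index_nodup _ _ _ _ (by intro m'; simp)
    by_cases hm : m ∈ seq
    · rw [if_pos hm]
      exact List.count_eq_one_of_mem hnd' ((hmemix m).mpr hm)
    · rw [if_neg hm]
      exact List.count_eq_zero.mpr (fun hu => hm ((hmemix m).mp hu))
  simp only [PySem.Dict.getD_empty, zero_add]
  have : (PySem.Set.ofList q).map (fun m => ((((pvB_index l mf).getD m []).count u : Nat) : Int))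
      = (PySem.Set.ofList q).map (fun m => if seq.contains m = true then (1 : Int) else 0) := by
    apply List.map_congr_left
    intro m _
    rw [hcount m]
    by_cases hm : m ∈ seq <;> simp [hm]
  rw [this, PySem.List.sum_map_ite_one_zero]
  simp only [PySem.Set.inter, PySem.Set.contains, List.countP_eq_length_filter]

-- ===== VERDICT (by name: the statement is the Claim_ definition above) =====
theorem find_closest_training_user_spec : Claim_equal_find_closest_training_user := by
  intro q st mf _ hpre
  unfold Spec_find_closest_training_user
  cases st with
  | none => rfl
  | some l =>
    simp only [find_closest_training_user, find_closest_training_user_alt]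
    unfold Pre_find_closest_training_user at hpre
    simp only [Option.getD_some] at hpre
    by_cases hl : l = []
    · simp only [hl, if_pos]
      rfl
    · rw [if_neg hl, if_neg hl]
      have hfold : l.foldl (fun (b : Int × Int) (p : Int × List Int) =>
          if (mf.lookup p.1).isSome then
            if ((PySem.Set.inter (PySem.Set.ofList q) p.2).length : Int) > b.2
            then (p.1, ((PySem.Set.inter (PySem.Set.ofList q) p.2).length : Int)) else b
          else b) (-1, -1)
        = l.foldl (fun (b : Int × Int) (p : Int × List Int) =>
          if (mf.lookup p.1).isSome then
            if (pvB_overlaps q (pvB_index l mf)).getD p.1 0 > b.2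
            then (p.1, (pvB_overlaps q (pvB_index l mf)).getD p.1 0) else b
          else b) (-1, -1) := by
        apply PySem.List.foldl_congr_mem
        intro b p hp
        by_cases hok : (mf.lookup p.1).isSome
        · rw [if_pos hok, if_pos hok,
            pv_overlap_eq q l mf hpre.2 (show (p.1, p.2) ∈ l by simpa using hp) hok]
        · rw [if_neg hok, if_neg hok]
      simp only [hfold]
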